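-- pv_equiv track=rewrite | github.com/pypi-data/pypi-mirror-63 | packages/hitk/hitk-0.1.2.tar.gz/hitk-0.1.2/hitk/common.py | _select_names
-- ===== SOURCE A (Python) =====
-- def _select_names(names, prefix='', suffix='', strip=False):
--     """条件に合致する名称を入手する"""
--     if not strip:
--         if prefix:
--             names = [fn for fn in names if fn.startswith(prefix)]
--         if suffix:
--             names = [fn for fn in names if fn.endswith(suffix)]
--     else:
--         if prefix:
--             plen = len(prefix)
--             names = [fn[plen:] for fn in names if fn.startswith(prefix)]
--         if suffix:
--             slen = -len(suffix)
--             names = [fn[:slen] for fn in names if fn.endswith(suffix)]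
--     return names
-- ===== SOURCE B (Python) =====
-- def _select_names(names, prefix='', suffix='', strip=False):
--     """条件に合致する名称を入手する"""
--     out = []
--     for fn in names:
--         v = fn
--         if prefix:
--             if not v.startswith(prefix):
--                 continue
--             if strip:
--                 v = v[len(prefix):]
--         if suffix:
--             if not v.endswith(suffix):
--                 continue
--             if strip:
--                 v = v[:-len(suffix)]
--         out.append(v)
--     return out
-- ===== Notes on version B (the rewrite author's own statement) =====
-- stated objective: simpler
-- what changed: Replaces the two sequential conditional list comprehensions (each rebuilding the whole list) with a single loop over names that tests/strips prefix then suffix per element and appends survivors once.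
import Mathlib
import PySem

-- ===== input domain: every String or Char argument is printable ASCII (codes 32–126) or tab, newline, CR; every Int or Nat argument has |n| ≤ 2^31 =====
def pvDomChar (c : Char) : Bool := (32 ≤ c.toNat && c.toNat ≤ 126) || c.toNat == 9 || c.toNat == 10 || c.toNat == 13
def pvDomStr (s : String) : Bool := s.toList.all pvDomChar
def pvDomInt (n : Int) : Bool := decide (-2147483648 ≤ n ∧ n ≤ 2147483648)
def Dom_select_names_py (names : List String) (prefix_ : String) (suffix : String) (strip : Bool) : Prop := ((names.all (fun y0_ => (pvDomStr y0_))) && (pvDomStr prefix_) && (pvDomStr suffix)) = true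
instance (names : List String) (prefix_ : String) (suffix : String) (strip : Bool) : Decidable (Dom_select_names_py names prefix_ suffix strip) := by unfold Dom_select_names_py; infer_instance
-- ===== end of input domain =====

-- B replaces A's two sequential conditional filter/map passes by one pass per name (prefix test/strip then suffix test/strip); equal return value on all inputs.


-- ===== PORT A =====
def select_names_py (names : List String) (prefix_ : String) (suffix : String) (strip : Bool) : List String :=
  if strip = false then
    let names1 := if prefix_ ≠ "" then names.filter (fun fn => PySem.Str.startswith fn prefix_) else names
    let names2 := if suffix ≠ "" then names1.filter (fun fn => PySem.Str.endswith fn suffix) else names1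
    names2
  else
    let names1 :=
      if prefix_ ≠ "" then
        let plen : Int := (PySem.Str.len prefix_ : Int)
        (names.filter (fun fn => PySem.Str.startswith fn prefix_)).map (fun fn => PySem.Str.slice fn (some plen) none)
      else names
    let names2 :=
      if suffix ≠ "" then
        let slen : Int := -(PySem.Str.len suffix : Int)
        (names1.filter (fun fn => PySem.Str.endswith fn suffix)).map (fun fn => PySem.Str.slice fn none (some slen))
      else names1
    names2

-- ===== PORT B =====
-- per-name processing of B: prefix block then suffix block; none = continue
def pvProcess (prefix_ suffix : String) (strip : Bool) (fn : String) : Option String :=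
  let step1 : Option String :=
    if prefix_ ≠ "" then
      if PySem.Str.startswith fn prefix_ then
        some (if strip then PySem.Str.slice fn (some (PySem.Str.len prefix_ : Int)) none else fn)
      else none
    else some fn
  match step1 with
  | none => none
  | some v =>
    if suffix ≠ "" then
      if PySem.Str.endswith v suffix then
        some (if strip then PySem.Str.slice v none (some (-(PySem.Str.len suffix : Int))) else v)
      else none
    else some v

def select_names_py_alt (names : List String) (prefix_ : String) (suffix : String) (strip : Bool) : List String :=
  names.foldl (fun out fn =>
    match pvProcess prefix_ suffix strip fn with
    | some v => out ++ [v]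
    | none => out) []

-- ===== PRECONDITION & SPEC =====
def Spec_select_names_py (names : List String) (prefix_ : String) (suffix : String) (strip : Bool) (out : List String) : Prop := out = select_names_py_alt names prefix_ suffix strip
instance (names : List String) (prefix_ : String) (suffix : String) (strip : Bool) (out : List String) : Decidable (Spec_select_names_py names prefix_ suffix strip out) := by unfold Spec_select_names_py; infer_instance

-- ===== CLAIM (what is proved, stated in full; the proofs are below) =====
def Claim_equal_select_names_py : Prop := ∀ (names : List String) (prefix_ : String) (suffix : String) (strip : Bool), Dom_select_names_py names prefix_ suffix strip → Spec_select_names_py names prefix_ suffix strip (select_names_py names prefix_ suffix strip)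

-- ===== LEMMAS AND PROOFS =====

-- B's append-fold is filterMap of its per-name step
theorem pvFoldl_eq_filterMap (f : String → Option String) (xs : List String) (acc : List String) :
    xs.foldl (fun out fn => match f fn with | some v => out ++ [v] | none => out) acc
      = acc ++ xs.filterMap f := by
  induction xs generalizing acc with
  | nil => simp
  | cons x xs ih =>
    cases h : f x <;> simp [List.foldl_cons, h, ih]

-- A's sequence of conditional filter/map passes equals filterMap of B's per-name step
theorem pvA_eq_filterMap (prefix_ suffix : String) (strip : Bool) (names : List String) :
    select_names_py names prefix_ suffix strip = names.filterMap (pvProcess prefix_ suffix strip) := by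
  induction names with
  | nil =>
    cases strip <;> by_cases hp : prefix_ = "" <;> by_cases hs : suffix = "" <;>
      simp [select_names_py, hp, hs]
  | cons x xs ih =>
    cases strip <;> by_cases hp : prefix_ = "" <;> by_cases hs : suffix = "" <;>
      simp only [select_names_py, pvProcess, hp, hs, ne_eq, not_true_eq_false, not_false_eq_true,
        if_true, if_false, List.filter_cons, List.filterMap_cons] at ih ⊢ <;>
      (try split_ifs) <;> (try split_ifs) <;> (try simp_all [List.filter_cons])
    all_goals (try rfl)
    all_goals (split_ifs <;> (try simp_all))
    all_goals rfl

theorem pvMain (names : List String) (prefix_ suffix : String) (strip : Bool) :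
    select_names_py names prefix_ suffix strip = select_names_py_alt names prefix_ suffix strip := by
  rw [select_names_py_alt, pvFoldl_eq_filterMap, List.nil_append, pvA_eq_filterMap]

-- ===== VERDICT (by name: the statement is the Claim_ definition above) =====
theorem select_names_py_spec : Claim_equal_select_names_py := by
  intro names prefix_ suffix strip _
  unfold Spec_select_names_py
  exact pvMain names prefix_ suffix strip
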